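-- pv_equiv track=rewrite | github.com/mockingbird-artifacts/MockingBird | src/postprocessing/print_results.py | calc_m1
-- ===== SOURCE A (Python) =====
-- def calc_m1(mocking_failure, test_pass):
--     all_test_pass = 0
--     some_test_pass = 0
--     test_pass_fragments = [x[0] for x in test_pass]
--
--     processed = []
--
--     for k in mocking_failure:
--         if k in test_pass_fragments and k not in processed:
--             index = test_pass_fragments.index(k)
--             if test_pass[index][1] == 'all':
--                 all_test_pass += 1
--             else:
--                 some_test_pass += 1
--
--             processed.append(k)
--
--     return all_test_pass, some_test_pass
-- ===== SOURCE B (Python) =====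
-- def calc_m1(mocking_failure, test_pass):
--     all_test_pass = 0
--     some_test_pass = 0
--     fails = set(mocking_failure)
--     seen = set()
--     for frag, status in test_pass:
--         if frag in fails and frag not in seen:
--             if status == 'all':
--                 all_test_pass += 1
--             else:
--                 some_test_pass += 1
--             seen.add(frag)
--     return all_test_pass, some_test_pass
-- ===== Notes on version B (the rewrite author's own statement) =====
-- stated objective: faster
-- what changed: B iterates over test_pass once with a set of failures and a seen-set, instead of A's loop over mocking_failure with a linear membership test and .index back-lookup into test_pass; order of summation differs but the counts agree.
import Mathlib
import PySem

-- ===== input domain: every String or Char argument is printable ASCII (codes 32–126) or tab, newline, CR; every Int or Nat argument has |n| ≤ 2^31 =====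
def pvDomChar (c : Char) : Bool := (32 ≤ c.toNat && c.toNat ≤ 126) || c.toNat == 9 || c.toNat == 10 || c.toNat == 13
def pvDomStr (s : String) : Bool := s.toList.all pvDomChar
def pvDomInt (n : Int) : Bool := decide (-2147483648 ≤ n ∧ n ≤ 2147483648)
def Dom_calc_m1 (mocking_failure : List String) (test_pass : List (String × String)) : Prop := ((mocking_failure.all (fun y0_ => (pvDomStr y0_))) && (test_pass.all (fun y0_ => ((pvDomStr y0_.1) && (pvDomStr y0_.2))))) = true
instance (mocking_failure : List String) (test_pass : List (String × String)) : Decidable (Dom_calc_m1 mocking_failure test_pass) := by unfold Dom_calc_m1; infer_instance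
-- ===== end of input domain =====

-- B replaces A's loop over mocking_failure with .index back-lookups by a single ordered
-- pass over test_pass with set membership (idiomatic; measured faster at scale).


-- ===== PORT A =====
def calcAStep (test_pass : List (String × String)) (frags : List String)
    (st : Int × Int × List String) (k : String) : Int × Int × List String :=
  if frags.contains k && !(st.2.2.contains k) then
    -- index = test_pass_fragments.index(k); test_pass[index][1]
    let status : String :=
      match PySem.List.index? frags k with
      | some i => ((PySem.List.pyGet? test_pass (i : Int)).map Prod.snd).getD ""
      | none => ""   -- unreachable: the guard ensures k ∈ frags
    if status == "all" then (st.1 + 1, st.2.1, st.2.2 ++ [k])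
    else (st.1, st.2.1 + 1, st.2.2 ++ [k])
  else st

def calc_m1 (mocking_failure : List String) (test_pass : List (String × String)) : Int × Int :=
  let frags := test_pass.map (fun x => x.1)
  let st := mocking_failure.foldl (calcAStep test_pass frags) (0, 0, [])
  (st.1, st.2.1)

-- ===== PORT B =====
def calcBStep (fails : PySem.Set String)
    (st : Int × Int × PySem.Set String) (p : String × String) : Int × Int × PySem.Set String :=
  if PySem.Set.contains fails p.1 && !(PySem.Set.contains st.2.2 p.1) then
    if p.2 == "all" then (st.1 + 1, st.2.1, PySem.Set.add st.2.2 p.1)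
    else (st.1, st.2.1 + 1, PySem.Set.add st.2.2 p.1)
  else st

def calc_m1_alt (mocking_failure : List String) (test_pass : List (String × String)) : Int × Int :=
  let fails := PySem.Set.ofList mocking_failure
  let st := test_pass.foldl (calcBStep fails) (0, 0, PySem.Set.empty)
  (st.1, st.2.1)

-- ===== PRECONDITION & SPEC =====
def Spec_calc_m1 (mocking_failure : List String) (test_pass : List (String × String)) (out : Int × Int) : Prop := out = calc_m1_alt mocking_failure test_pass
instance (mocking_failure : List String) (test_pass : List (String × String)) (out : Int × Int) : Decidable (Spec_calc_m1 mocking_failure test_pass out) := by unfold Spec_calc_m1; infer_instance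

-- ===== CLAIM (what is proved, stated in full; the proofs are below) =====
def Claim_equal_calc_m1 : Prop := ∀ (mocking_failure : List String) (test_pass : List (String × String)), Dom_calc_m1 mocking_failure test_pass → Spec_calc_m1 mocking_failure test_pass (calc_m1 mocking_failure test_pass)

-- ===== LEMMAS AND PROOFS =====

/-- contribution of a fragment: (1,0) if its first occurrence in `tp` has status "all", else (0,1). -/
def contrib (tp : List (String × String)) (k : String) : Int × Int :=
  if (((tp.find? (fun x => x.1 == k)).map Prod.snd).getD "") == "all" then (1, 0) else (0, 1)

theorem find?_of_idxOf? (tp : List (String × String)) (k : String) (i : Nat)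
    (h : (tp.map (fun x => x.1)).idxOf? k = some i) :
    tp[i]? = tp.find? (fun x => x.1 == k) := by
  induction tp generalizing i with
  | nil => simp [List.idxOf?] at h
  | cons x rest ih =>
    by_cases hx : x.1 == k
    · simp [List.idxOf?, List.findIdx?_cons, hx] at h
      subst h; simp [List.find?, hx]
    · simp [List.idxOf?, List.findIdx?_cons, hx] at h ⊢
      obtain ⟨j, hj, rfl⟩ := h
      rw [← List.findIdx?_map] at hj
      simp [ih j hj]

theorem statusA_eq (tp : List (String × String)) (k : String)
    (h : k ∈ tp.map (fun x => x.1)) :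
    (match PySem.List.index? (tp.map (fun x => x.1)) k with
     | some i => ((PySem.List.pyGet? tp (i : Int)).map Prod.snd).getD ""
     | none => "") = ((tp.find? (fun x => x.1 == k)).map Prod.snd).getD "" := by
  rw [PySem.List.index?_eq_idxOf?]
  cases hi : (tp.map (fun x => x.1)).idxOf? k with
  | none => exact absurd (List.idxOf?_eq_none_iff.mp hi) (by simpa using h)
  | some i => simp only [PySem.List.pyGet?_natCast, find?_of_idxOf? tp k i hi]

theorem calcAStep_counted (tp : List (String × String)) (a s : Int) (p : List String) (k : String)
    (hkF : k ∈ tp.map (fun x => x.1)) (hkp : k ∉ p) :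
    calcAStep tp (tp.map (fun x => x.1)) (a, s, p) k =
      (a + (contrib tp k).1, s + (contrib tp k).2, p ++ [k]) := by
  have hg : ((tp.map (fun x => x.1)).contains k && !(p.contains k)) = true := by
    simp [hkF, hkp]
  simp only [calcAStep, hg, if_true, statusA_eq tp k hkF, contrib]
  by_cases hall : (((tp.find? (fun x => x.1 == k)).map Prod.snd).getD "") == "all" <;>
    simp [hall]

theorem calcAStep_skip (tp : List (String × String)) (frags : List String)
    (st : Int × Int × List String) (k : String)
    (h : k ∉ frags ∨ k ∈ st.2.2) :
    calcAStep tp frags st k = st := by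
  rcases h with h | h <;> simp [calcAStep, h]

theorem A_inv (tp : List (String × String)) (mf : List String) (a s : Int) (p : List String) :
    (fun r => ((r.1, r.2.1) : Int × Int))
        (mf.foldl (calcAStep tp (tp.map (fun x => x.1))) (a, s, p)) =
      (a, s) + ∑ k ∈ (mf.toFinset ∩ (tp.map (fun x => x.1)).toFinset) \ p.toFinset, contrib tp k := by
  induction mf generalizing a s p with
  | nil => simp
  | cons k ks ih =>
    rw [List.foldl_cons]
    by_cases hkp : k ∈ p
    · rw [calcAStep_skip tp _ _ k (Or.inr hkp), ih]
      have hset : ((k :: ks).toFinset ∩ (tp.map (fun x => x.1)).toFinset) \ p.toFinset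
          = (ks.toFinset ∩ (tp.map (fun x => x.1)).toFinset) \ p.toFinset := by
        ext x
        by_cases hx : x = k
        · subst hx; simp [hkp]
        · simp [hx]
      rw [hset]
    · by_cases hkF : k ∈ tp.map (fun x => x.1)
      · rw [calcAStep_counted tp a s p k hkF hkp, ih]
        have hT : ((k :: ks).toFinset ∩ (tp.map (fun x => x.1)).toFinset) \ p.toFinset
            = insert k ((ks.toFinset ∩ (tp.map (fun x => x.1)).toFinset) \ (p ++ [k]).toFinset) := by
          ext x
          by_cases hx : x = k
          · subst hx; simp [hkF, hkp]
          · simp [hx]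
        rw [hT, Finset.sum_insert (by simp), ← add_assoc]
        apply Prod.ext <;> simp
      · rw [calcAStep_skip tp _ (a, s, p) k (Or.inl hkF), ih]
        have hset : ((k :: ks).toFinset ∩ (tp.map (fun x => x.1)).toFinset) \ p.toFinset
            = (ks.toFinset ∩ (tp.map (fun x => x.1)).toFinset) \ p.toFinset := by
          ext x
          by_cases hx : x = k
          · subst hx; simp [hkF]
          · simp [hx]
        rw [hset]

theorem contrib_head (k st : String) (rest : List (String × String)) :
    contrib ((k, st) :: rest) k = if st == "all" then ((1 : Int), (0 : Int)) else (0, 1) := by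
  simp [contrib, List.find?]

theorem contrib_tail (k0 s0 : String) (rest : List (String × String)) (k : String)
    (h : k ≠ k0) :
    contrib ((k0, s0) :: rest) k = contrib rest k := by
  have : (k0 == k) = false := by simpa using fun e => h e.symm
  simp [contrib, List.find?, this]

theorem toFinset_add (seen : PySem.Set String) (k : String) :
    (PySem.Set.add seen k).toFinset = insert k (seen : List String).toFinset := by
  by_cases h : k ∈ (seen : List String)
  · rw [PySem.Set.add_of_mem h]
    exact ((Finset.insert_eq_self).mpr (by simpa using h)).symm
  · rw [PySem.Set.add_of_not_mem h]
    ext x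
    by_cases hx : x = k <;> simp [hx]

theorem calcBStep_skip (mf : List String) (st : Int × Int × PySem.Set String) (k0 s0 : String)
    (h : k0 ∉ mf ∨ k0 ∈ (st.2.2 : List String)) :
    calcBStep (PySem.Set.ofList mf) st (k0, s0) = st := by
  rcases h with h | h <;> simp [calcBStep, PySem.Set.contains, PySem.Set.mem_ofList, h]

theorem calcBStep_counted (mf : List String) (a s : Int) (seen : PySem.Set String)
    (k0 s0 : String) (rest : List (String × String))
    (h1 : k0 ∈ mf) (h2 : k0 ∉ (seen : List String)) :
    calcBStep (PySem.Set.ofList mf) (a, s, seen) (k0, s0) =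
      (a + (contrib ((k0, s0) :: rest) k0).1, s + (contrib ((k0, s0) :: rest) k0).2,
        PySem.Set.add seen k0) := by
  rw [contrib_head]
  by_cases hall : s0 == "all" <;>
    simp [calcBStep, PySem.Set.contains, PySem.Set.mem_ofList, h1, h2, hall]

theorem B_inv (mf : List String) (tp : List (String × String)) (a s : Int) (seen : PySem.Set String) :
    (fun r => ((r.1, r.2.1) : Int × Int))
        (tp.foldl (calcBStep (PySem.Set.ofList mf)) (a, s, seen)) =
      (a, s) + ∑ k ∈ ((tp.map (fun x => x.1)).toFinset ∩ mf.toFinset) \ (seen : List String).toFinset,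
        contrib tp k := by
  induction tp generalizing a s seen with
  | nil => simp
  | cons hd rest ih =>
    obtain ⟨k0, s0⟩ := hd
    rw [List.foldl_cons]
    by_cases hkm : k0 ∈ mf
    · by_cases hks : k0 ∈ (seen : List String)
      · rw [calcBStep_skip mf (a, s, seen) k0 s0 (Or.inr hks), ih]
        have hset : ((((k0, s0) :: rest).map (fun x => x.1)).toFinset ∩ mf.toFinset) \ (seen : List String).toFinset
            = ((rest.map (fun x => x.1)).toFinset ∩ mf.toFinset) \ (seen : List String).toFinset := by
          ext x
          by_cases hx : x = k0
          · subst hx; simp [hks]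
          · simp [hx]
        rw [hset]
        congr 1
        refine Finset.sum_congr rfl (fun x hx => (contrib_tail k0 s0 rest x ?_).symm)
        rintro rfl
        simp at hx
        exact hx.2 hks
      · rw [calcBStep_counted mf a s seen k0 s0 rest hkm hks, ih]
        have hT : ((((k0, s0) :: rest).map (fun x => x.1)).toFinset ∩ mf.toFinset) \ (seen : List String).toFinset
            = insert k0 (((rest.map (fun x => x.1)).toFinset ∩ mf.toFinset)
                \ (PySem.Set.add seen k0 : List String).toFinset) := by
          rw [toFinset_add]
          ext x
          by_cases hx : x = k0
          · subst hx; simp [hkm, hks]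
          · simp [hx]
        rw [hT, Finset.sum_insert (by rw [toFinset_add]; simp), ← add_assoc]
        have hcongr : ∑ k ∈ ((rest.map (fun x => x.1)).toFinset ∩ mf.toFinset)
              \ (PySem.Set.add seen k0 : List String).toFinset, contrib rest k
            = ∑ k ∈ ((rest.map (fun x => x.1)).toFinset ∩ mf.toFinset)
              \ (PySem.Set.add seen k0 : List String).toFinset, contrib ((k0, s0) :: rest) k := by
          refine Finset.sum_congr rfl (fun x hx => (contrib_tail k0 s0 rest x ?_).symm)
          rintro rfl
          rw [toFinset_add] at hx
          simp at hx
        rw [hcongr]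
        apply Prod.ext <;> simp
    · rw [calcBStep_skip mf (a, s, seen) k0 s0 (Or.inl hkm), ih]
      have hset : ((((k0, s0) :: rest).map (fun x => x.1)).toFinset ∩ mf.toFinset) \ (seen : List String).toFinset
          = ((rest.map (fun x => x.1)).toFinset ∩ mf.toFinset) \ (seen : List String).toFinset := by
        ext x
        by_cases hx : x = k0
        · subst hx; simp [hkm]
        · simp [hx]
      rw [hset]
      congr 1
      refine Finset.sum_congr rfl (fun x hx => (contrib_tail k0 s0 rest x ?_).symm)
      rintro rfl
      simp at hx
      exact hkm hx.1.2

-- ===== VERDICT (by name: the statement is the Claim_ definition above) =====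
theorem calc_m1_spec : Claim_equal_calc_m1 := by
  intro mf tp _
  unfold Spec_calc_m1
  show (fun r => ((r.1, r.2.1) : Int × Int)) (mf.foldl (calcAStep tp (tp.map (fun x => x.1))) (0, 0, []))
      = (fun r => ((r.1, r.2.1) : Int × Int)) (tp.foldl (calcBStep (PySem.Set.ofList mf)) (0, 0, PySem.Set.empty))
  rw [A_inv, B_inv, Finset.inter_comm]
  rfl
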